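-- pv_equiv track=rewrite | github.com/jeffrylew/lc-crash-course | binary_search/longest_subsequence_with_limited_sum.py | answerQueriesDS2
-- ===== SOURCE A (Python) =====
-- import bisect
--
-- def answerQueriesDS2(nums: list[int], queries: list[int]) -> list[int]:
--     # Get the prefix sum array of the sorted nums
--     nums.sort()
--     for i in range(1, len(nums)):
--         nums[i] += nums[i - 1]
--
--     answer = []
--
--     # For each query, find its insertion point to the prefix sum array
--     for query in queries:
--         index = bisect.bisect_right(nums, query)
--         answer.append(index)
--
--     return answer
-- ===== SOURCE B (Python) =====
-- def answerQueriesDS2(nums: list[int], queries: list[int]) -> list[int]: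
--     # sorted prefix sums, written back so nums is mutated exactly as in A
--     nums.sort()
--     total = 0
--     prefix = []
--     for v in nums:
--         total += v
--         prefix.append(total)
--     nums[:] = prefix
--
--     answer = [0] * len(queries)
--
--     def solve(lo, hi, batch):
--         # offline divide & conquer: push the whole query batch down the tree
--         # of index windows in one recursion instead of one search per query
--         if not batch:
--             return
--         if lo >= hi:
--             for _, pos in batch:
--                 answer[pos] = lo
--             return
--         mid = (lo + hi) // 2
--         pivot = prefix[mid]
--         solve(lo, mid, [t for t in batch if t[0] < pivot])
--         solve(mid + 1, hi, [t for t in batch if not t[0] < pivot])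
--
--     solve(0, len(prefix), [(q, i) for i, q in enumerate(queries)])
--     return answer
-- ===== Notes on version B (the rewrite author's own statement) =====
-- stated objective: alternative
-- what changed: B answers all queries offline in one divide-and-conquer recursion that partitions the whole query batch at each prefix-array midpoint and scatters results back by original index, instead of A's independent per-query bisect_right binary searches; the prefix array is built with a running-total accumulator instead of in-place pairwise adds.
import Mathlib
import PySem

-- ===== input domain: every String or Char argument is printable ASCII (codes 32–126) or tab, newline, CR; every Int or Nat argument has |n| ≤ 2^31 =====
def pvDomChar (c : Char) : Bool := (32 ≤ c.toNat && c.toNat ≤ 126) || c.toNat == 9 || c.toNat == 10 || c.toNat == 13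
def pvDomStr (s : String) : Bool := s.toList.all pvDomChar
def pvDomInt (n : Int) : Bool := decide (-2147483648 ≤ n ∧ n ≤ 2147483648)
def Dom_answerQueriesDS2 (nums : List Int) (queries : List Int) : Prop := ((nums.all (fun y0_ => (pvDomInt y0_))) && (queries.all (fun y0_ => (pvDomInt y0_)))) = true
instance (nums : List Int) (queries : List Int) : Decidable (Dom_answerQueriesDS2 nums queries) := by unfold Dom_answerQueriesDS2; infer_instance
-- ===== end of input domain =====

-- B answers all queries offline in ONE divide-and-conquer recursion that pushes the whole
-- query batch down the tree of index windows (partitioning at each midpoint) and scatters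
-- answers back by original position, instead of A's independent per-query bisect_right
-- searches; the prefix array is built with a running-total accumulator.
-- A mutates `nums` in place (sorted, then prefix-summed); B performs the same observable
-- mutation; the theorems below are about the return value.

-- ===== PORT A =====
-- bisect.bisect_right is PySem.List.bisectRight
def answerQueriesDS2 (nums : List Int) (queries : List Int) : List Int :=
  let s := PySem.List.sorted nums (fun v => v)
  let p := (PySem.List.pyRange 1 (s.length : Int) 1).foldl
      (fun l i => PySem.List.pySetD l i (PySem.List.pyGetD l i 0 + PySem.List.pyGetD l (i - 1) 0)) s
  queries.foldl (fun answer query => answer ++ [((PySem.List.bisectRight p query : Nat) : Int)]) []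

-- ===== PORT B =====
-- Source B's nested `solve(lo, hi, batch)`: offline divide & conquer over index windows;
-- `answer` is threaded as an explicit argument since Lean has no mutation
def pvSolve (pre : List Int) (lo hi : Nat) (batch : List (Int × Int)) (ans : List Int) : List Int :=
  if batch = [] then ans
  else if lo ≥ hi then batch.foldl (fun a t => PySem.List.pySetD a t.2 (lo : Int)) ans
  else
    let mid : Nat := (lo + hi) / 2
    let pivot := PySem.List.pyGetD pre (mid : Int) 0
    let ans1 := pvSolve pre lo mid (batch.filter (fun t => decide (t.1 < pivot))) ans
    pvSolve pre (mid + 1) hi (batch.filter (fun t => decide (¬ t.1 < pivot))) ans1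
termination_by hi - lo
decreasing_by all_goals omega

def answerQueriesDS2_alt (nums : List Int) (queries : List Int) : List Int :=
  let s := PySem.List.sorted nums (fun v => v)
  let pre := (s.foldl (fun st v => (st.1 + v, st.2 ++ [st.1 + v])) ((0 : Int), ([] : List Int))).2
  let ans0 := List.replicate queries.length (0 : Int)
  pvSolve pre 0 pre.length ((PySem.List.enumerate queries).map (fun p => (p.2, p.1))) ans0

-- ===== PRECONDITION & SPEC =====
def Spec_answerQueriesDS2 (nums : List Int) (queries : List Int) (out : List Int) : Prop := out = answerQueriesDS2_alt nums queries
instance (nums : List Int) (queries : List Int) (out : List Int) : Decidable (Spec_answerQueriesDS2 nums queries out) := by unfold Spec_answerQueriesDS2; infer_instance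

-- ===== CLAIM (what is proved, stated in full; the proofs are below) =====
def Claim_equal_answerQueriesDS2 : Prop := ∀ (nums : List Int) (queries : List Int), Dom_answerQueriesDS2 nums queries → Spec_answerQueriesDS2 nums queries (answerQueriesDS2 nums queries)

-- ===== LEMMAS AND PROOFS =====

-- canonical prefix sums with carry c
def pvPS (c : Int) : List Int → List Int
  | [] => []
  | v :: t => (c + v) :: pvPS (c + v) t

theorem pvPS_length (c : Int) (l : List Int) : (pvPS c l).length = l.length := by
  induction l generalizing c with
  | nil => rfl
  | cons v t ih => simp [pvPS, ih]

theorem pvPS_append (c : Int) (l : List Int) (w : Int) :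
    pvPS c (l ++ [w]) = pvPS c l ++ [c + l.sum + w] := by
  induction l generalizing c with
  | nil => simp [pvPS]
  | cons v t ih => simp [pvPS, ih, add_assoc]

theorem pvPS_getLast? (c : Int) (l : List Int) (h : l ≠ []) :
    (pvPS c l).getLast? = some (c + l.sum) := by
  induction l generalizing c with
  | nil => exact absurd rfl h
  | cons v t ih =>
    cases t with
    | nil => simp [pvPS]
    | cons w t' =>
      rw [pvPS, pvPS, List.getLast?_cons_cons, ← pvPS, ih (c + v) (by simp)]
      simp [add_assoc]

-- B's running-total fold builds pvPS
theorem pvFoldB (l : List Int) (c : Int) (acc : List Int) :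
    (l.foldl (fun st v => (st.1 + v, st.2 ++ [st.1 + v])) (c, acc)).2 = acc ++ pvPS c l := by
  induction l generalizing c acc with
  | nil => simp [pvPS]
  | cons v t ih => simp [List.foldl, ih, pvPS]

-- A's in-place loop builds pvPS: invariant over the already-processed part `pre`
theorem pvFoldA (rest pre : List Int) (hpre : pre ≠ []) :
    (PySem.List.pyRange (pre.length : Int) ((pre.length : Int) + (rest.length : Int)) 1).foldl
      (fun l i => PySem.List.pySetD l i (PySem.List.pyGetD l i 0 + PySem.List.pyGetD l (i - 1) 0))
      (pvPS 0 pre ++ rest) = pvPS 0 (pre ++ rest) := by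
  induction rest generalizing pre with
  | nil => simp [PySem.List.pyRange_one_eq_nil]
  | cons w rest' ih =>
    have hn : 0 < pre.length := List.length_pos_iff.mpr hpre
    have hP : (pvPS 0 pre).length = pre.length := pvPS_length 0 pre
    rw [PySem.List.pyRange_one_cons (by simp only [List.length_cons]; push_cast; omega)]
    rw [List.foldl_cons]
    have h1 : PySem.List.pyGetD (pvPS 0 pre ++ w :: rest') ((pre.length : Int)) 0 = w := by
      rw [PySem.List.pyGetD_natCast]
      rw [List.getD_eq_getElem?_getD, ← hP, List.getElem?_append_right (le_refl _)]
      simp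
    have h2 : PySem.List.pyGetD (pvPS 0 pre ++ w :: rest') ((pre.length : Int) - 1) 0 = 0 + pre.sum := by
      have hc : ((pre.length : Int) - 1) = ((pre.length - 1 : Nat) : Int) := by omega
      rw [hc, PySem.List.pyGetD_natCast]
      rw [List.getD_eq_getElem?_getD, List.getElem?_append_left (by omega)]
      rw [show pre.length - 1 = (pvPS 0 pre).length - 1 by omega]
      rw [← List.getLast?_eq_getElem?, pvPS_getLast? 0 pre hpre]
      rfl
    have hset : PySem.List.pySetD (pvPS 0 pre ++ w :: rest') ((pre.length : Int))
        (PySem.List.pyGetD (pvPS 0 pre ++ w :: rest') ((pre.length : Int)) 0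
          + PySem.List.pyGetD (pvPS 0 pre ++ w :: rest') ((pre.length : Int) - 1) 0)
        = pvPS 0 (pre ++ [w]) ++ rest' := by
      rw [h1, h2, PySem.List.pySetD_natCast]
      rw [← hP, List.set_append_right _ _ (le_refl _)]
      rw [pvPS_append]
      simp only [Nat.sub_self, List.set_cons_zero, List.append_assoc, List.singleton_append]
      congr 2
      ring
    rw [hset]
    have ihh := ih (pre ++ [w]) (by simp)
    have ha : (((pre ++ [w]).length : Nat) : Int) = (pre.length : Int) + 1 := by
      simp only [List.length_append, List.length_cons, List.length_nil]; push_cast; ring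
    have hb : ((pre.length : Int) + 1) + ((rest'.length : Nat) : Int)
        = (pre.length : Int) + (((w :: rest').length : Nat) : Int) := by
      simp only [List.length_cons]; push_cast; ring
    rw [ha, hb, List.append_assoc, List.singleton_append] at ihh
    exact ihh

-- A's prefix loop computes pvPS 0 s
theorem pvPrefixA (s : List Int) :
    (PySem.List.pyRange 1 (s.length : Int) 1).foldl
      (fun l i => PySem.List.pySetD l i (PySem.List.pyGetD l i 0 + PySem.List.pyGetD l (i - 1) 0)) s
    = pvPS 0 s := by
  cases s with
  | nil => simp [PySem.List.pyRange_one_eq_nil, pvPS]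
  | cons v t =>
    have h := pvFoldA t [v] (by simp)
    have ha : ((([v] : List Int).length : Nat) : Int) = 1 := by simp
    have hb : (1 : Int) + ((t.length : Nat) : Int) = (((v :: t).length : Nat) : Int) := by
      simp only [List.length_cons]; push_cast; ring
    rw [ha, hb] at h
    simpa [pvPS] using h

-- proof-side recursive binary search with bisect_right's midpoint rule
def pvBisectRec (a : List Int) (x : Int) (lo hi : Nat) : Nat :=
  if lo ≥ hi then lo
  else
    let mid : Nat := (lo + hi) / 2
    if x < PySem.List.pyGetD a (mid : Int) 0 then
      pvBisectRec a x lo mid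
    else
      pvBisectRec a x (mid + 1) hi
termination_by hi - lo
decreasing_by all_goals omega

-- iterative fuelled bisect loop = the recursive index-window search, on ARBITRARY lists
theorem pvBisectLoop_eq (xs : List Int) (x : Int) :
    ∀ (fuel lo hi : Nat), hi ≤ xs.length → hi - lo ≤ fuel →
      PySem.List.bisectRightLoop xs x fuel lo hi = pvBisectRec xs x lo hi := by
  intro fuel
  induction fuel with
  | zero =>
    intro lo hi h2 h3
    rw [PySem.List.bisectRightLoop, pvBisectRec]
    simp [show hi ≤ lo by omega]
  | succ fuel ih =>
    intro lo hi h2 h3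
    by_cases hlt : lo < hi
    · have hmlen : (lo + hi) / 2 < xs.length := by omega
      have hget : xs[(lo + hi) / 2]? = some xs[(lo + hi) / 2] := List.getElem?_eq_getElem hmlen
      have hgetD : PySem.List.pyGetD xs (((lo + hi) / 2 : Nat) : Int) 0 = xs[(lo + hi) / 2] := by
        rw [PySem.List.pyGetD_natCast]
        exact List.getD_eq_getElem _ _ hmlen
      rw [PySem.List.bisectRightLoop, pvBisectRec]
      simp only [if_pos hlt, hget, ge_iff_le, if_neg (by omega : ¬ hi ≤ lo), hgetD]
      by_cases hx : x < xs[(lo + hi) / 2]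
      · simp only [if_pos hx]
        exact ih lo ((lo + hi) / 2) (by omega) (by omega)
      · simp only [if_neg hx]
        exact ih ((lo + hi) / 2 + 1) hi (by omega) (by omega)
    · rw [PySem.List.bisectRightLoop, pvBisectRec]
      simp [hlt, show hi ≤ lo by omega]

theorem pvBisect_eq (xs : List Int) (x : Int) :
    PySem.List.bisectRight xs x = pvBisectRec xs x 0 xs.length := by
  exact pvBisectLoop_eq xs x xs.length 0 xs.length le_rfl (by omega)

-- pvSolve = scattering, for each (q, pos) in the batch, the per-query search result at pos
theorem pvSolve_eq (pre : List Int) :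
    ∀ (d lo hi : Nat), hi - lo ≤ d → ∀ (batch : List (Int × Int)) (ans : List Int),
      batch.Pairwise (fun a b => a.2 ≠ b.2) → (∀ t ∈ batch, 0 ≤ t.2) →
      pvSolve pre lo hi batch ans
        = batch.foldl (fun a t => PySem.List.pySetD a t.2 ((pvBisectRec pre t.1 lo hi : Nat) : Int)) ans := by
  intro d
  induction d with
  | zero =>
    intro lo hi hd batch ans hpw hnn
    rw [pvSolve]
    have hge : lo ≥ hi := by omega
    simp only [ge_iff_le, if_pos (by omega : hi ≤ lo)]
    have hb : ∀ (q : Int), pvBisectRec pre q lo hi = lo := by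
      intro q; rw [pvBisectRec]; simp [hge]
    split_ifs with h0
    · subst h0; rfl
    · simp only [hb]
  | succ d ih =>
    intro lo hi hd batch ans hpw hnn
    rw [pvSolve]
    by_cases h0 : batch = []
    · subst h0; simp
    rw [if_neg h0]
    by_cases hge : lo ≥ hi
    · rw [if_pos hge]
      have hb : ∀ (q : Int), pvBisectRec pre q lo hi = lo := by
        intro q; rw [pvBisectRec]; simp [hge]
      simp only [hb]
    rw [if_neg hge]
    have hlt : lo < hi := by omega
    show pvSolve pre ((lo + hi) / 2 + 1) hi
        (batch.filter (fun t => decide (¬ t.1 < PySem.List.pyGetD pre (((lo + hi) / 2 : Nat) : Int) 0)))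
        (pvSolve pre lo ((lo + hi) / 2)
          (batch.filter (fun t => decide (t.1 < PySem.List.pyGetD pre (((lo + hi) / 2 : Nat) : Int) 0))) ans)
      = _
    have hnotp : (fun t : Int × Int => decide (¬ t.1 < PySem.List.pyGetD pre (((lo + hi) / 2 : Nat) : Int) 0))
        = (fun t : Int × Int => !(decide (t.1 < PySem.List.pyGetD pre (((lo + hi) / 2 : Nat) : Int) 0))) := by
      funext t
      simp only [decide_not]
    rw [hnotp]
    have hbr : ∀ (q : Int), pvBisectRec pre q lo hi
        = if q < PySem.List.pyGetD pre (((lo + hi) / 2 : Nat) : Int) 0 then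
            pvBisectRec pre q lo ((lo + hi) / 2)
          else pvBisectRec pre q ((lo + hi) / 2 + 1) hi := by
      intro q
      rw [pvBisectRec]
      simp only [ge_iff_le, if_neg (by omega : ¬ hi ≤ lo)]
    have hcomm : ∀ x ∈ batch, ∀ y ∈ batch, ∀ (z : List Int),
        PySem.List.pySetD (PySem.List.pySetD z x.2 ((pvBisectRec pre x.1 lo hi : Nat) : Int)) y.2 ((pvBisectRec pre y.1 lo hi : Nat) : Int)
        = PySem.List.pySetD (PySem.List.pySetD z y.2 ((pvBisectRec pre y.1 lo hi : Nat) : Int)) x.2 ((pvBisectRec pre x.1 lo hi : Nat) : Int) := by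
      intro x hx y hy z
      by_cases hxy : x = y
      · subst hxy; rfl
      have hne : x.2 ≠ y.2 := by
        have hsymm : Symmetric (fun a b : Int × Int => a.2 ≠ b.2) := fun a b h => h.symm
        exact hpw.forall hsymm hx hy hxy
      have h0x := hnn x hx
      have h0y := hnn y hy
      rw [show x.2 = ((x.2.toNat : Nat) : Int) by omega, show y.2 = ((y.2.toNat : Nat) : Int) by omega,
        PySem.List.pySetD_natCast, PySem.List.pySetD_natCast, PySem.List.pySetD_natCast, PySem.List.pySetD_natCast]
      exact List.set_comm _ _ (by omega)
    have hperm := List.filter_append_perm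
      (fun t : Int × Int => decide (t.1 < PySem.List.pyGetD pre (((lo + hi) / 2 : Nat) : Int) 0)) batch
    rw [← hperm.foldl_eq' (fun x hx y hy z => hcomm x (hperm.mem_iff.mp hx) y (hperm.mem_iff.mp hy) z) ans]
    rw [List.foldl_append]
    have hsubl := List.filter_sublist
      (p := fun t : Int × Int => decide (t.1 < PySem.List.pyGetD pre (((lo + hi) / 2 : Nat) : Int) 0)) (l := batch)
    have hsubr := List.filter_sublist
      (p := fun t : Int × Int => !(decide (t.1 < PySem.List.pyGetD pre (((lo + hi) / 2 : Nat) : Int) 0))) (l := batch)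
    have ihl := ih lo ((lo + hi) / 2) (by omega)
      (batch.filter (fun t => decide (t.1 < PySem.List.pyGetD pre (((lo + hi) / 2 : Nat) : Int) 0))) ans
      (hpw.sublist hsubl) (fun t ht => hnn t (hsubl.mem ht))
    have ihr := ih ((lo + hi) / 2 + 1) hi (by omega)
      (batch.filter (fun t => !(decide (t.1 < PySem.List.pyGetD pre (((lo + hi) / 2 : Nat) : Int) 0))))
      (pvSolve pre lo ((lo + hi) / 2)
        (batch.filter (fun t => decide (t.1 < PySem.List.pyGetD pre (((lo + hi) / 2 : Nat) : Int) 0))) ans)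
      (hpw.sublist hsubr) (fun t ht => hnn t (hsubr.mem ht))
    have e1 := PySem.List.foldl_congr_mem
      (batch.filter (fun t => decide (t.1 < PySem.List.pyGetD pre (((lo + hi) / 2 : Nat) : Int) 0)))
      (fun a (t : Int × Int) => PySem.List.pySetD a t.2 ((pvBisectRec pre t.1 lo ((lo + hi) / 2) : Nat) : Int))
      (fun a (t : Int × Int) => PySem.List.pySetD a t.2 ((pvBisectRec pre t.1 lo hi : Nat) : Int))
      ans
      (by
        intro acc x hx
        have hxlt : x.1 < PySem.List.pyGetD pre (((lo + hi) / 2 : Nat) : Int) 0 := by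
          have := (List.mem_filter.mp hx).2
          simpa using this
        simp only [hbr, if_pos hxlt])
    rw [ihr, ihl, e1]
    apply PySem.List.foldl_congr_mem
    intro acc x hx
    have hxge : ¬ x.1 < PySem.List.pyGetD pre (((lo + hi) / 2 : Nat) : Int) 0 := by
      have := (List.mem_filter.mp hx).2
      simpa using this
    simp only [hbr, if_neg hxge]

-- scattering f over an enumerated list onto a long-enough array writes the map
theorem pvScatter (f : Int → Int) :
    ∀ (qs : List Int) (s : Int) (ans : List Int), 0 ≤ s → ans.length = s.toNat + qs.length →
      ((PySem.List.enumerate qs s).map (fun p => (p.2, p.1))).foldl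
        (fun a t => PySem.List.pySetD a t.2 (f t.1)) ans
      = ans.take s.toNat ++ qs.map f := by
  intro qs
  induction qs with
  | nil =>
    intro s ans hs hlen
    simp [PySem.List.enumerate_nil, List.take_of_length_le, hlen]
  | cons q qs ih =>
    intro s ans hs hlen
    rw [PySem.List.enumerate_cons]
    simp only [List.map_cons, List.foldl_cons]
    have hset : PySem.List.pySetD ans s (f q) = ans.set s.toNat (f q) := by
      rw [show (s : Int) = ((s.toNat : Nat) : Int) by omega, PySem.List.pySetD_natCast, Int.toNat_natCast]
    rw [hset]
    have hlen' : ans.length = s.toNat + qs.length + 1 := by simp at hlen; omega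
    have hklt : s.toNat < ans.length := by omega
    have := ih (s + 1) (ans.set s.toNat (f q)) (by omega)
      (by simp; omega)
    rw [this]
    have h1 : (s + 1).toNat = s.toNat + 1 := by omega
    rw [h1]
    have htake : (ans.set s.toNat (f q)).take (s.toNat + 1) = ans.take s.toNat ++ [f q] := by
      rw [List.take_add_one]
      rw [List.getElem?_set_self (by simpa using hklt)]
      rw [List.take_set_of_le (le_refl _)]
      simp
    rw [htake]
    simp

-- ===== VERDICT (by name: the statement is the Claim_ definition above) =====
theorem answerQueriesDS2_spec : Claim_equal_answerQueriesDS2 := by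
  intro nums queries _
  unfold Spec_answerQueriesDS2 answerQueriesDS2 answerQueriesDS2_alt
  simp only []
  rw [pvPrefixA, pvFoldB]
  rw [PySem.List.foldl_append_singleton_eq_map]
  simp only [List.nil_append]
  have hpw : (((PySem.List.enumerate queries).map (fun p => (p.2, p.1))).Pairwise
      (fun a b : Int × Int => a.2 ≠ b.2)) := by
    apply List.Pairwise.map
    · intro a b hab
      exact ne_of_lt hab
    · exact PySem.List.pairwise_lt_enumerate queries 0
  have hnn : ∀ t ∈ (PySem.List.enumerate queries).map (fun p => (p.2, p.1)), 0 ≤ t.2 := by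
    intro t ht
    obtain ⟨p, hp, rfl⟩ := List.mem_map.mp ht
    obtain ⟨k, hk, hpk⟩ := (PySem.List.mem_enumerate_iff queries 0 p).mp hp
    subst hpk
    simp
  rw [pvSolve_eq (pvPS 0 (PySem.List.sorted nums fun v => v))
      (pvPS 0 (PySem.List.sorted nums fun v => v)).length 0
      (pvPS 0 (PySem.List.sorted nums fun v => v)).length (by omega) _ _ hpw hnn]
  rw [pvScatter (fun q => ((pvBisectRec (pvPS 0 (PySem.List.sorted nums fun v => v)) q 0
        (pvPS 0 (PySem.List.sorted nums fun v => v)).length : Nat) : Int)) queries 0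
      (List.replicate queries.length 0) (by omega) (by simp)]
  simp [pvBisect_eq]
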